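-- pv_equiv track=rewrite | github.com/eshun4/FundamentalCodingInterviewPrep | 07/duplicate_digit.py | solution
-- ===== SOURCE A (Python) =====
-- def solution(n):
--     doubled_number = 0
--     multiplier = 1
--
--     while n > 0:
--         digit = n % 10
--         # Add the digit twice, each time adjusting the position with the multiplier
--         doubled_number += digit * multiplier
--         multiplier *= 10
--         doubled_number += digit * multiplier
--         multiplier *= 10
--         n = n // 10
--
--     return doubled_number
-- ===== SOURCE B (Python) =====
-- def solution(n):
--     # Recursive, most-significant-first: each digit d contributes acc*100 + 11*d.
--     if n <= 0:
--         return 0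
--     return solution(n // 10) * 100 + 11 * (n % 10)
-- ===== Notes on version B (the rewrite author's own statement) =====
-- stated objective: simpler
-- what changed: Replaces the iterative loop that peels digits with a running power-of-ten multiplier and two separate additions by a three-line recursion that builds the result most-significant-first, appending each digit twice, with no multiplier state.
import Mathlib
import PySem

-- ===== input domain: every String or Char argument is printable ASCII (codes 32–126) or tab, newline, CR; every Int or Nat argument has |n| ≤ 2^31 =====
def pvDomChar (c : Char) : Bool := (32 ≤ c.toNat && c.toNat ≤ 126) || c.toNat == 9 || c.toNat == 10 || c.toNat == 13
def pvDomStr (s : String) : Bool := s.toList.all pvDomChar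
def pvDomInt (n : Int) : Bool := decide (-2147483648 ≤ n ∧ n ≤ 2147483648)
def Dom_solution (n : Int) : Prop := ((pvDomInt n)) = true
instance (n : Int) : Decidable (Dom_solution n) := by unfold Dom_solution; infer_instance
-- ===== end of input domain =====

-- B replaces A's multiplier-carrying digit loop by a simpler most-significant-first recursion that appends each digit twice.

theorem pvFloordiv10_toNat_lt (n : Int) (h : 0 < n) :
    (PySem.Int.floordiv n 10).toNat < n.toNat := by
  rw [PySem.Int.floordiv_eq_ediv_of_pos (by norm_num)]
  omega

-- ===== PORT A =====
def solutionLoop (n doubled_number multiplier : Int) : Int :=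
  if h : n > 0 then
    let digit := PySem.Int.mod n 10
    let doubled_number := doubled_number + digit * multiplier
    let multiplier := multiplier * 10
    let doubled_number := doubled_number + digit * multiplier
    let multiplier := multiplier * 10
    solutionLoop (PySem.Int.floordiv n 10) doubled_number multiplier
  else doubled_number
termination_by n.toNat
decreasing_by exact pvFloordiv10_toNat_lt n h

def solution (n : Int) : Int := solutionLoop n 0 1

-- ===== PORT B =====
def solution_alt (n : Int) : Int :=
  if h : n ≤ 0 then 0
  else solution_alt (PySem.Int.floordiv n 10) * 100 + 11 * PySem.Int.mod n 10
termination_by n.toNat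
decreasing_by exact pvFloordiv10_toNat_lt n (by omega)

-- ===== PRECONDITION & SPEC =====
def Spec_solution (n : Int) (out : Int) : Prop := out = solution_alt n
instance (n : Int) (out : Int) : Decidable (Spec_solution n out) := by unfold Spec_solution; infer_instance

-- ===== CLAIM (what is proved, stated in full; the proofs are below) =====
def Claim_equal_solution : Prop := ∀ (n : Int), Dom_solution n → Spec_solution n (solution n)

-- ===== LEMMAS AND PROOFS =====
theorem solutionLoop_eq (k : Nat) : ∀ (n d m : Int), n.toNat ≤ k →
    solutionLoop n d m = d + m * solution_alt n := by
  induction k with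
  | zero =>
    intro n d m hk
    have hn : n ≤ 0 := by omega
    rw [solutionLoop, solution_alt]
    simp [hn, not_lt.mpr hn]
  | succ k ih =>
    intro n d m hk
    by_cases h : 0 < n
    · rw [solutionLoop, solution_alt]
      simp only [h, not_le.mpr h, dif_pos, dif_neg, not_false_iff]
      rw [ih _ _ _ (by have := pvFloordiv10_toNat_lt n h; omega)]
      ring
    · have hn : n ≤ 0 := by omega
      rw [solutionLoop, solution_alt]
      simp [hn, not_lt.mpr hn]

-- ===== VERDICT (by name: the statement is the Claim_ definition above) =====
theorem solution_spec : Claim_equal_solution := by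
  intro n _
  show solution n = solution_alt n
  rw [solution, solutionLoop_eq n.toNat n 0 1 le_rfl]
  ring
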